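-- pv_equiv track=rewrite | github.com/tubox-labs/Aquilia | aquilia/db/backends/oracle.py | adapt_sql
-- ===== SOURCE A (Python) =====
-- def adapt_sql(sql: str) -> str:
--     """
--     Convert ``?`` placeholders to ``:1, :2, ...`` for oracledb.
--
--     String-literal safe -- skips ``?`` inside single-quoted strings.
--     """
--     result: list[str] = []
--     param_idx = 0
--     in_string = False
--     i = 0
--     while i < len(sql):
--         ch = sql[i]
--         if ch == "'" and not in_string:
--             in_string = True
--             result.append(ch)
--         elif ch == "'" and in_string:
--             # Check for escaped quote ''
--             if i + 1 < len(sql) and sql[i + 1] == "'":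
--                 result.append("''")
--                 i += 2
--                 continue
--             in_string = False
--             result.append(ch)
--         elif ch == "?" and not in_string:
--             param_idx += 1
--             result.append(f":{param_idx}")
--         else:
--             result.append(ch)
--         i += 1
--     return "".join(result)
-- ===== SOURCE B (Python) =====
-- def adapt_sql(sql: str) -> str:
--     """
--     Convert ``?`` placeholders to ``:1, :2, ...`` for oracledb.
--
--     Split-based: segments at even positions of sql.split("'") are outside
--     single-quoted literals (a doubled '' contributes an empty odd segment),
--     so only those get their ``?`` replaced; rejoin with "'".
--     """
--     parts = sql.split("'")
--     n = 0
--     out = []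
--     for idx, seg in enumerate(parts):
--         if idx % 2 == 0:
--             pieces = seg.split("?")
--             new = pieces[0]
--             for p in pieces[1:]:
--                 n += 1
--                 new += ":" + str(n) + p
--             out.append(new)
--         else:
--             out.append(seg)
--     return "'".join(out)
-- ===== Notes on version B (the rewrite author's own statement) =====
-- stated objective: faster
-- what changed: Replaced the per-character while loop with an in_string flag and escaped-quote lookahead by a split-based pipeline: splitting on the quote character puts non-literal text exactly at even indices (a doubled quote escape yields an empty odd segment), each even segment has its placeholder pieces rejoined around :N counters, and the segments are rejoined.
import Mathlib
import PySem

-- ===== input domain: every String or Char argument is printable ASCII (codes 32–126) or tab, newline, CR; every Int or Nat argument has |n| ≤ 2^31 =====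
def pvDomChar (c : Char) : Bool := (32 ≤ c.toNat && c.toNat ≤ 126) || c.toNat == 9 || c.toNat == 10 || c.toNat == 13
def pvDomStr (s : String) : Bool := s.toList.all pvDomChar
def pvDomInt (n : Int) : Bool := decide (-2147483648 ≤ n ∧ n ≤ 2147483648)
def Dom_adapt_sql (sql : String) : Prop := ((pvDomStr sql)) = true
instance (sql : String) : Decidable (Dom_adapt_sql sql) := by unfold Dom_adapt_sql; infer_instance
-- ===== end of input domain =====

-- B replaces A's per-character scan with an in_string flag by a split-based segment
-- pipeline (same O(n), measurably faster constants via C-level str.split); return values proved equal.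


-- ===== PORT A =====
-- the while loop of A: one step per character, except the escaped-quote case which
-- consumes two; `result` is Python's list of appended strings (as char lists),
-- joined with "" at the end.  Exact: strings are char lists, f":{k}" = ':' :: str(k).
def adaptA : List Char → Int → Bool → List (List Char) → List (List Char)
  | [], _, _, result => result
  | ch :: rest, paramIdx, inString, result =>
    if ch == '\'' && !inString then
      adaptA rest paramIdx true (result ++ [['\'']])
    else if ch == '\'' && inString then
      match rest with
      | '\'' :: rest2 => adaptA rest2 paramIdx inString (result ++ [['\'', '\'']])
      | r => adaptA r paramIdx false (result ++ [['\'']])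
    else if ch == '?' && !inString then
      adaptA rest (paramIdx + 1) inString (result ++ [':' :: PySem.Int.toChars (paramIdx + 1)])
    else
      adaptA rest paramIdx inString (result ++ [[ch]])
termination_by cs _ _ _ => cs.length
decreasing_by all_goals (simp only [List.length_cons]; omega)

def adapt_sql (sql : String) : String :=
  String.ofList (PySem.Chars.join [] (adaptA sql.toList 0 false []))

-- ===== PORT B =====
-- B: parts = sql.split("'"); even-indexed parts get their '?' pieces rejoined
-- around ':'+str(n); rejoin all parts with "'".

-- the inner `for p in pieces[1:]` loop of B (carries the global counter n)
def altSeg : List (List Char) → Int → List Char × Int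
  | [], n => ([], n)
  | p :: ps, n =>
    let r := altSeg ps (n + 1)
    (':' :: PySem.Int.toChars (n + 1) ++ p ++ r.1, r.2)

-- one even-indexed segment: pieces = seg.split("?"); new = pieces[0] + loop
def altEven (seg : List Char) (n : Int) : List Char × Int :=
  match PySem.Chars.splitOn seg ['?'] with
  | [] => ([], n)          -- unreachable: str.split never returns an empty list
  | p0 :: ps =>
    let r := altSeg ps n
    (p0 ++ r.1, r.2)

-- the `for idx, seg in enumerate(parts)` loop building `out`
def altLoop : List (Int × List Char) → Int → List (List Char)
  | [], _ => []
  | (idx, seg) :: rest, n =>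
    if idx % 2 == 0 then
      let r := altEven seg n
      r.1 :: altLoop rest r.2
    else
      seg :: altLoop rest n

def adapt_sql_alt (sql : String) : String :=
  String.ofList (PySem.Chars.join ['\'']
    (altLoop (PySem.List.enumerate (PySem.Chars.splitOn sql.toList ['\'']) 0) 0))

-- ===== PRECONDITION & SPEC =====
def Spec_adapt_sql (sql : String) (out : String) : Prop := out = adapt_sql_alt sql
instance (sql : String) (out : String) : Decidable (Spec_adapt_sql sql out) := by unfold Spec_adapt_sql; infer_instance

-- ===== CLAIM (what is proved, stated in full; the proofs are below) =====
def Claim_equal_adapt_sql : Prop := ∀ (sql : String), Dom_adapt_sql sql → Spec_adapt_sql sql (adapt_sql sql)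

-- ===== LEMMAS AND PROOFS =====

-- prepend x to the first block of a block list
def consHead (x : List Char) : List (List Char) → List (List Char)
  | [] => [x]
  | h :: t => (x ++ h) :: t

-- structural form of single-character str.split
def splitOnSimple (q : Char) : List Char → List (List Char)
  | [] => [[]]
  | c :: rest => if c = q then [] :: splitOnSimple q rest else consHead [c] (splitOnSimple q rest)

-- flat (accumulator-free) form of A's loop
def coreA : List Char → Int → Bool → List Char
  | [], _, _ => []
  | ch :: rest, k, inString =>
    if ch == '\'' && !inString then
      '\'' :: coreA rest k true
    else if ch == '\'' && inString then
      match rest with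
      | '\'' :: rest2 => '\'' :: '\'' :: coreA rest2 k inString
      | r => '\'' :: coreA r k false
    else if ch == '?' && !inString then
      ':' :: PySem.Int.toChars (k + 1) ++ coreA rest (k + 1) inString
    else
      ch :: coreA rest k inString
termination_by cs _ _ => cs.length
decreasing_by all_goals (simp only [List.length_cons]; omega)

theorem splitOnSimple_shape (q : Char) (cs : List Char) :
    ∃ h t, splitOnSimple q cs = h :: t := by
  cases cs with
  | nil => exact ⟨[], [], rfl⟩
  | cons c rest =>
    by_cases hc : c = q
    · exact ⟨[], splitOnSimple q rest, by simp [splitOnSimple, hc]⟩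
    · rcases hrec : splitOnSimple q rest with _ | ⟨h, t⟩
      · exact ⟨[c], [], by simp [splitOnSimple, hc, hrec, consHead]⟩
      · exact ⟨c :: h, t, by simp [splitOnSimple, hc, hrec, consHead]⟩

theorem go_single (q : Char) : ∀ (fuel : Nat) (l cur : List Char) (acc : List (List Char)),
    l.length < fuel →
    PySem.Chars.splitOn.go [q] fuel l cur acc = acc.reverse ++ consHead cur.reverse (splitOnSimple q l) := by
  intro fuel
  induction fuel with
  | zero => intro l cur acc h; omega
  | succ m ih =>
    intro l cur acc h
    cases l with
    | nil =>
      rw [PySem.Chars.splitOn.go.eq_def]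
      simp [splitOnSimple, consHead]
    | cons c rest =>
      have hlen : rest.length < m := by simpa using h
      rw [PySem.Chars.splitOn.go.eq_def]
      simp only [List.isPrefixOf, Bool.and_true]
      by_cases hc : c = q
      · subst hc
        rw [if_pos (by simp)]
        simp only [List.length_cons, List.length_nil, List.drop_succ_cons, List.drop_zero]
        rw [ih rest [] (cur.reverse :: acc) hlen]
        obtain ⟨hh, tt, hs⟩ := splitOnSimple_shape c rest
        simp [splitOnSimple, hs, consHead]
      · rw [if_neg (by simp only [beq_iff_eq]; exact fun h' => hc h'.symm)]
        rw [ih rest (c :: cur) acc hlen]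
        obtain ⟨hh, tt, hs⟩ := splitOnSimple_shape q rest
        simp [splitOnSimple, hc, hs, consHead]

theorem splitOn_single (q : Char) (cs : List Char) :
    PySem.Chars.splitOn cs [q] = splitOnSimple q cs := by
  rw [PySem.Chars.splitOn.eq_def, go_single q (cs.length + 1) cs [] [] (by omega)]
  obtain ⟨hh, tt, hs⟩ := splitOnSimple_shape q cs
  simp [hs, consHead]

theorem joinE : ∀ (M : List (List Char)), PySem.Chars.join [] M = M.flatten
  | [] => by simp [PySem.Chars.join, List.intercalate]
  | [x] => by simp [PySem.Chars.join, List.intercalate]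
  | x :: y :: t => by
    rw [PySem.Chars.join_cons_cons, joinE (y :: t)]
    simp

-- coreA equations
theorem coreA_nil (k : Int) (b : Bool) : coreA [] k b = [] := by rw [coreA]

theorem coreA_quote_false (rest : List Char) (k : Int) :
    coreA ('\'' :: rest) k false = '\'' :: coreA rest k true := by
  rw [coreA.eq_def]; simp

theorem coreA_quote_true (rest : List Char) (k : Int) :
    coreA ('\'' :: rest) k true = '\'' :: coreA rest k false := by
  rw [coreA.eq_def]; simp
  cases rest with
  | nil => simp [coreA_nil]
  | cons c rest2 =>
    by_cases hc : c = '\''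
    · subst hc; simp [coreA_quote_false]
    · simp [hc]

theorem coreA_q_false (rest : List Char) (k : Int) :
    coreA ('?' :: rest) k false = ':' :: PySem.Int.toChars (k + 1) ++ coreA rest (k + 1) false := by
  rw [coreA.eq_def]; simp

theorem coreA_other_false (c : Char) (rest : List Char) (k : Int) (h1 : c ≠ '\'') (h2 : c ≠ '?') :
    coreA (c :: rest) k false = c :: coreA rest k false := by
  rw [coreA.eq_def]; simp [h1, h2]

theorem coreA_in_string (c : Char) (rest : List Char) (k : Int) (h1 : c ≠ '\'') :
    coreA (c :: rest) k true = c :: coreA rest k true := by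
  rw [coreA.eq_def]; simp [h1]

theorem adaptA_acc : ∀ (cs : List Char) (k : Int) (b : Bool) (acc : List (List Char)),
    (adaptA cs k b acc).flatten = acc.flatten ++ coreA cs k b := by
  intro cs k b acc
  fun_induction adaptA cs k b acc with
  | case1 => rw [coreA_nil]; simp
  | case2 ch rest k b acc h1 ih =>
    rw [ih]
    conv_rhs => rw [coreA.eq_def]
    simp only [h1, if_pos]
    simp
  | case3 ch k b acc h1 h2 rest2 ih =>
    rw [ih]
    obtain ⟨rfl, rfl⟩ : ch = '\'' ∧ b = true := by simpa using h2
    rw [coreA_quote_true, coreA_quote_false]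
    simp
  | case4 ch k b acc h1 h2 rest hne ih =>
    rw [ih]
    obtain ⟨rfl, rfl⟩ : ch = '\'' ∧ b = true := by simpa using h2
    rw [coreA_quote_true]
    simp
  | case5 ch rest k b acc h1 h2 h3 ih =>
    rw [ih]
    obtain ⟨rfl, rfl⟩ : ch = '?' ∧ b = false := by simpa using h3
    rw [coreA_q_false]
    simp
  | case6 ch rest k b acc h1 h2 h3 ih =>
    rw [ih]
    cases b with
    | true =>
      have hch : ch ≠ '\'' := by simpa using h2
      rw [coreA_in_string ch rest k hch]
      simp
    | false =>
      have hch : ch ≠ '\'' := by simpa using h1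
      have hq : ch ≠ '?' := by simpa using h3
      rw [coreA_other_false ch rest k hch hq]
      simp

-- altEven equations
theorem altEven_nil (n : Int) : altEven [] n = ([], n) := by
  simp [altEven, splitOn_single, splitOnSimple, altSeg]

theorem altEven_q (seg : List Char) (n : Int) :
    altEven ('?' :: seg) n =
      (':' :: PySem.Int.toChars (n + 1) ++ (altEven seg (n + 1)).1, (altEven seg (n + 1)).2) := by
  obtain ⟨hh, tt, hs⟩ := splitOnSimple_shape '?' seg
  simp [altEven, splitOn_single, splitOnSimple, hs, altSeg]

theorem altEven_c (c : Char) (seg : List Char) (n : Int) (hc : c ≠ '?') :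
    altEven (c :: seg) n = (c :: (altEven seg n).1, (altEven seg n).2) := by
  obtain ⟨hh, tt, hs⟩ := splitOnSimple_shape '?' seg
  simp [altEven, splitOn_single, splitOnSimple, hc, hs, consHead]

-- altLoop step equations
theorem al_cons_even (i0 : Int) (h : List Char) (L : List (Int × List Char)) (n : Int)
    (hi : i0 % 2 = 0) :
    altLoop ((i0, h) :: L) n = (altEven h n).1 :: altLoop L (altEven h n).2 := by
  simp [altLoop, hi]

theorem al_cons_odd (i0 : Int) (h : List Char) (L : List (Int × List Char)) (n : Int)
    (hi : i0 % 2 ≠ 0) :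
    altLoop ((i0, h) :: L) n = h :: altLoop L n := by
  simp [altLoop, hi]

-- join lemmas for the quote separator
theorem joinq_prepend (sep x h : List Char) (M : List (List Char)) :
    PySem.Chars.join sep ((x ++ h) :: M) = x ++ PySem.Chars.join sep (h :: M) := by
  cases M with
  | nil => simp [PySem.Chars.join, List.intercalate]
  | cons y t => rw [PySem.Chars.join_cons_cons, PySem.Chars.join_cons_cons]; simp

theorem joinq_nil_cons (y : List Char) (t : List (List Char)) :
    PySem.Chars.join ['\''] ([] :: y :: t) = '\'' :: PySem.Chars.join ['\''] (y :: t) := by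
  rw [PySem.Chars.join_cons_cons]
  simp

-- main equivalence of the two loop pipelines
theorem main_lemma : ∀ (cs : List Char) (n i0 : Int) (b : Bool), (b = false ↔ i0 % 2 = 0) →
    PySem.Chars.join ['\''] (altLoop (PySem.List.enumerate (splitOnSimple '\'' cs) i0) n)
      = coreA cs n b := by
  intro cs
  induction cs with
  | nil =>
    intro n i0 b hb
    cases b with
    | false =>
      have hi : i0 % 2 = 0 := hb.mp rfl
      simp [splitOnSimple, PySem.List.enumerate_cons, PySem.List.enumerate_nil,
        al_cons_even _ _ _ _ hi, altEven_nil, altLoop, coreA_nil,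
        PySem.Chars.join, List.intercalate]
    | true =>
      have hi : i0 % 2 ≠ 0 := fun h => absurd (hb.mpr h) (by simp)
      simp [splitOnSimple, PySem.List.enumerate_cons, PySem.List.enumerate_nil,
        al_cons_odd _ _ _ _ hi, altLoop, coreA_nil, PySem.Chars.join, List.intercalate]
  | cons c rest ih =>
    intro n i0 b hb
    by_cases hc : c = '\''
    · subst hc
      obtain ⟨h, t, hs⟩ := splitOnSimple_shape '\'' rest
      rw [show splitOnSimple '\'' ('\'' :: rest) = [] :: splitOnSimple '\'' rest by
        simp [splitOnSimple]]
      rw [hs, PySem.List.enumerate_cons]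
      cases b with
      | false =>
        have hi : i0 % 2 = 0 := hb.mp rfl
        have hi1 : (i0 + 1) % 2 ≠ 0 := by omega
        rw [al_cons_even _ _ _ _ hi, altEven_nil]
        have e1 : altLoop (PySem.List.enumerate (h :: t) (i0 + 1)) n
            = h :: altLoop (PySem.List.enumerate t (i0 + 1 + 1)) n := by
          rw [PySem.List.enumerate_cons, al_cons_odd _ _ _ _ hi1]
        rw [e1, joinq_nil_cons, ← e1, ← hs, ih n (i0 + 1) true (by simp; omega)]
        rw [coreA_quote_false]
      | true =>
        have hi : i0 % 2 ≠ 0 := fun h' => absurd (hb.mpr h') (by simp)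
        have hi1 : (i0 + 1) % 2 = 0 := by omega
        rw [al_cons_odd _ _ _ _ hi]
        have e1 : altLoop (PySem.List.enumerate (h :: t) (i0 + 1)) n
            = (altEven h n).1 :: altLoop (PySem.List.enumerate t (i0 + 1 + 1)) (altEven h n).2 := by
          rw [PySem.List.enumerate_cons, al_cons_even _ _ _ _ hi1]
        rw [e1, joinq_nil_cons, ← e1, ← hs, ih n (i0 + 1) false (by simp [hi1])]
        rw [coreA_quote_true]
    · obtain ⟨h, t, hs⟩ := splitOnSimple_shape '\'' rest
      rw [show splitOnSimple '\'' (c :: rest) = consHead [c] (splitOnSimple '\'' rest) by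
        simp [splitOnSimple, hc]]
      rw [hs]
      rw [show consHead [c] (h :: t) = ([c] ++ h) :: t by simp [consHead]]
      rw [PySem.List.enumerate_cons]
      cases b with
      | true =>
        have hi : i0 % 2 ≠ 0 := fun h' => absurd (hb.mpr h') (by simp)
        rw [al_cons_odd _ _ _ _ hi, joinq_prepend]
        have e1 : altLoop (PySem.List.enumerate (h :: t) i0) n
            = h :: altLoop (PySem.List.enumerate t (i0 + 1)) n := by
          rw [PySem.List.enumerate_cons, al_cons_odd _ _ _ _ hi]
        rw [← e1, ← hs, ih n i0 true hb, coreA_in_string c rest n hc]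
        simp
      | false =>
        have hi : i0 % 2 = 0 := hb.mp rfl
        rw [al_cons_even _ _ _ _ hi]
        simp only [List.singleton_append]
        by_cases hq : c = '?'
        · subst hq
          rw [altEven_q]
          have e1 : altLoop (PySem.List.enumerate (h :: t) i0) (n + 1)
              = (altEven h (n + 1)).1 :: altLoop (PySem.List.enumerate t (i0 + 1)) (altEven h (n + 1)).2 := by
            rw [PySem.List.enumerate_cons, al_cons_even _ _ _ _ hi]
          rw [show ((':' :: PySem.Int.toChars (n + 1) ++ (altEven h (n + 1)).1,
                (altEven h (n + 1)).2) : List Char × Int).1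
              = (':' :: PySem.Int.toChars (n + 1)) ++ (altEven h (n + 1)).1 from rfl,
            show ((':' :: PySem.Int.toChars (n + 1) ++ (altEven h (n + 1)).1,
                (altEven h (n + 1)).2) : List Char × Int).2 = (altEven h (n + 1)).2 from rfl]
          rw [joinq_prepend, ← e1, ← hs, ih (n + 1) i0 false hb]
          rw [coreA_q_false]
        · rw [altEven_c c h n hq]
          have e1 : altLoop (PySem.List.enumerate (h :: t) i0) n
              = (altEven h n).1 :: altLoop (PySem.List.enumerate t (i0 + 1)) (altEven h n).2 := by
            rw [PySem.List.enumerate_cons, al_cons_even _ _ _ _ hi]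
          rw [show (c :: (altEven h n).1 : List Char) = [c] ++ (altEven h n).1 from rfl,
            joinq_prepend, ← e1, ← hs, ih n i0 false hb,
            coreA_other_false c rest n hc hq]
          simp

-- ===== VERDICT (by name: the statement is the Claim_ definition above) =====
theorem adapt_sql_spec : Claim_equal_adapt_sql := by
  intro sql _
  unfold Spec_adapt_sql adapt_sql adapt_sql_alt
  rw [joinE, adaptA_acc, splitOn_single,
    main_lemma sql.toList 0 0 false (by norm_num)]
  rfl
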